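-- pv_equiv track=rewrite | github.com/mortenator/epitome | agents/production_workbook_generator.py | _count_crew_rows
-- ===== SOURCE A (Python) =====
-- def _count_crew_rows(crew_list: list) -> int:
--     """Count total rows needed for a crew list (including department headers)."""
--     if not crew_list:
--         return 0
--     total = 0
--     seen_depts = set()
--     for person in crew_list:
--         dept = person.get('department', 'Unknown')
--         if dept not in seen_depts:
--             seen_depts.add(dept)
--             total += 1  # Department header row
--         total += 1  # Crew member row
--     return total
-- ===== SOURCE B (Python) =====
-- def _count_crew_rows(crew_list: list) -> int:
--     """Count total rows needed for a crew list (including department headers)."""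
--     if not crew_list:
--         return 0
--     dept = crew_list[0].get('department', 'Unknown')
--     group = sum(1 for p in crew_list if p.get('department', 'Unknown') == dept)
--     rest = [p for p in crew_list if p.get('department', 'Unknown') != dept]
--     return 1 + group + _count_crew_rows(rest)
-- ===== Notes on version B (the rewrite author's own statement) =====
-- stated objective: alternative
-- what changed: Replaces A's single pass with a seen-departments set and a running total by a recursive partition: count the first person's whole department group plus one header, then recurse on the people of the remaining departments (no set, no accumulator).
import Mathlib
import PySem

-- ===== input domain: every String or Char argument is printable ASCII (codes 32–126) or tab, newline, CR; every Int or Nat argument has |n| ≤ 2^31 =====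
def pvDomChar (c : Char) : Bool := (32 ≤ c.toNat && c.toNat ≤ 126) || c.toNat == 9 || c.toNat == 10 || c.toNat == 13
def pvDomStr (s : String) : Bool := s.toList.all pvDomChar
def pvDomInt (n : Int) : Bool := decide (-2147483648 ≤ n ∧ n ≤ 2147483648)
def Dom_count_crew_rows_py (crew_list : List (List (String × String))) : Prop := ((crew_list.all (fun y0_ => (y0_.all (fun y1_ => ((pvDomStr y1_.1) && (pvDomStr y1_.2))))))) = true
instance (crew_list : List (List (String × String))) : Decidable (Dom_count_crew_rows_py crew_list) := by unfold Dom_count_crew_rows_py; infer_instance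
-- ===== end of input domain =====

-- B replaces A's one-pass seen-set accumulation by recursive partitioning on the first person's department (alternative decomposition, same result).

-- ===== PORT A =====
-- person.get('department', 'Unknown') on the association list representing the dict
def pvDept (person : List (String × String)) : String :=
  PySem.Dict.getD (PySem.Dict.mk person) "department" "Unknown"

-- the loop body of A: header row when the department is new, then the member row
def pvStep (st : Int × PySem.Set String) (person : List (String × String)) :
    Int × PySem.Set String :=
  let dept := pvDept person
  let st :=
    if PySem.Set.contains st.2 dept then st
    else (st.1 + 1, PySem.Set.add st.2 dept)  -- department header row
  (st.1 + 1, st.2)                            -- crew member row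

def count_crew_rows_py (crew_list : List (List (String × String))) : Int :=
  if crew_list = [] then 0
  else (crew_list.foldl pvStep (0, PySem.Set.empty)).1

-- ===== PORT B =====
-- recursion: one department group (its size + 1 header) per step, recurse on the other departments' people
def count_crew_rows_py_alt : List (List (String × String)) → Int
  | [] => 0
  | p :: tl =>
    1 + (((p :: tl).countP (fun q => pvDept q == pvDept p)) : Int)
      + count_crew_rows_py_alt ((p :: tl).filter (fun q => pvDept q != pvDept p))
termination_by l => l.length
decreasing_by
  have h := List.length_filter_le (fun q => pvDept q != pvDept p) tl
  simp
  omega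

-- ===== PRECONDITION & SPEC =====
def Spec_count_crew_rows_py (crew_list : List (List (String × String))) (out : Int) : Prop := out = count_crew_rows_py_alt crew_list
instance (crew_list : List (List (String × String))) (out : Int) : Decidable (Spec_count_crew_rows_py crew_list out) := by unfold Spec_count_crew_rows_py; infer_instance

-- ===== CLAIM =====
def Claim_equal_count_crew_rows_py : Prop := ∀ (crew_list : List (List (String × String))), Dom_count_crew_rows_py crew_list → Spec_count_crew_rows_py crew_list (count_crew_rows_py crew_list)

-- ===== LEMMAS AND PROOFS =====

-- Loop invariant of A's fold: final total + |seen at start| = start total + rows + |seen updated with all depts|.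
theorem pv_fold_inv (l : List (List (String × String))) :
    ∀ (t : Int) (seen : PySem.Set String),
      ((l.foldl pvStep (t, seen)).1 : Int) + (seen.length : Int)
      = t + (l.length : Int) + ((PySem.Set.update seen (l.map pvDept)).length : Int) := by
  induction l with
  | nil => intro t seen; simp [PySem.Set.update]
  | cons p rest ih =>
    intro t seen
    rw [List.foldl_cons, List.map_cons, PySem.Set.update_cons]
    by_cases h : PySem.Set.contains seen (pvDept p) = true
    · have hm : pvDept p ∈ seen := by simpa using h
      have hadd : PySem.Set.add seen (pvDept p) = seen := by simp [PySem.Set.add, hm]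
      have hstep : pvStep (t, seen) p = (t + 1, seen) := by simp [pvStep, hm]
      rw [hstep, hadd, ih (t + 1) seen]
      simp; omega
    · have hm : pvDept p ∉ seen := by simpa using h
      have hadd : PySem.Set.add seen (pvDept p) = seen ++ [pvDept p] := by
        simp [PySem.Set.add, hm]
      have hstep : pvStep (t, seen) p = (t + 1 + 1, PySem.Set.add seen (pvDept p)) := by
        simp [pvStep, hm]
      have ih' := ih (t + 1 + 1) (PySem.Set.add seen (pvDept p))
      rw [hstep]
      rw [hadd] at ih' ⊢
      simp [List.length_append] at ih' ⊢
      omega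

-- Removing one present value from a list drops the distinct count by exactly one.
theorem pv_ofList_filter_len (xs : List String) (d : String) (hd : d ∈ xs) :
    (PySem.Set.ofList xs).length
      = (PySem.Set.ofList (xs.filter (fun x => x != d))).length + 1 := by
  have h1 : (PySem.Set.ofList xs).toFinset = xs.toFinset := by
    ext x; simp [PySem.Set.mem_ofList]
  have h2 : (PySem.Set.ofList (xs.filter (fun x => x != d))).toFinset
      = xs.toFinset.erase d := by
    ext x
    simp [PySem.Set.mem_ofList, List.mem_filter, Finset.mem_erase, and_comm]
  have n1 : (PySem.Set.ofList xs).Nodup := PySem.Set.nodup_ofList xs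
  have n2 : (PySem.Set.ofList (xs.filter (fun x => x != d))).Nodup :=
    PySem.Set.nodup_ofList _
  have c1 := List.toFinset_card_of_nodup n1
  have c2 := List.toFinset_card_of_nodup n2
  rw [h1] at c1
  rw [h2] at c2
  have hmem : d ∈ xs.toFinset := List.mem_toFinset.2 hd
  have hce : (xs.toFinset.erase d).card + 1 = xs.toFinset.card :=
    Finset.card_erase_add_one hmem
  omega

-- B computes length + number of distinct departments.
theorem pv_alt_closed (l : List (List (String × String))) :
    count_crew_rows_py_alt l
      = (l.length : Int) + ((PySem.Set.ofList (l.map pvDept)).length : Int) := by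
  induction l using count_crew_rows_py_alt.induct with
  | case1 => simp [count_crew_rows_py_alt]
  | case2 p tl ih =>
    rw [count_crew_rows_py_alt, ih]
    have hsplit : ((p :: tl).countP (fun q => pvDept q == pvDept p))
        + ((p :: tl).filter (fun q => pvDept q != pvDept p)).length
        = (p :: tl).length := by
      rw [← List.countP_eq_length_filter]
      have := List.length_eq_countP_add_countP (l := p :: tl)
        (p := fun q => pvDept q == pvDept p)
      simpa [bne] using this.symm
    have hmapf : ((p :: tl).filter (fun q => pvDept q != pvDept p)).map pvDept
        = ((p :: tl).map pvDept).filter (fun x => x != pvDept p) := by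
      rw [List.filter_map]; rfl
    have hset := pv_ofList_filter_len ((p :: tl).map pvDept) (pvDept p)
      (by simp)
    rw [hmapf]
    omega

-- ===== VERDICT =====
theorem count_crew_rows_py_spec : Claim_equal_count_crew_rows_py := by
  intro crew_list _
  unfold Spec_count_crew_rows_py
  rw [pv_alt_closed]
  unfold count_crew_rows_py
  by_cases h : crew_list = []
  · simp [h]
  · simp only [h, if_false]
    have inv := pv_fold_inv crew_list 0 PySem.Set.empty
    rw [PySem.Set.update_empty] at inv
    simpa [PySem.Set.empty] using inv
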